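-- pv_equiv track=rewrite | github.com/ChitrankSurana/Password-Manager-Local | src/gui/password_health.py | _get_password_issues
-- ===== SOURCE A (Python) =====
-- from typing import Any, Dict, List
--
-- def _get_password_issues(password: str) -> List[str]:
--     """Get specific issues with a password"""
--     issues = []
--
--     if len(password) < 8:
--         issues.append("Too short (less than 8 characters)")
--
--     if not any(c.islower() for c in password):
--         issues.append("No lowercase letters")
--
--     if not any(c.isupper() for c in password):
--         issues.append("No uppercase letters")
--
--     if not any(c.isdigit() for c in password):
--         issues.append("No numbers")
--
--     if not any(c in "!@#$%^&*()_+-=[]{}|;:,.<>?" for c in password):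
--         issues.append("No special characters")
--
--     if password.lower() in ["password", "123456", "qwerty", "abc123", "letmein"]:
--         issues.append("Common/dictionary password")
--
--     return issues
-- ===== SOURCE B (Python) =====
-- from typing import List
--
-- def _get_password_issues(password: str) -> List[str]:
--     """Get specific issues with a password (single-pass class scan)."""
--     has_lower = has_upper = has_digit = has_special = False
--     for c in password:
--         if c.islower():
--             has_lower = True
--         elif c.isupper():
--             has_upper = True
--         elif c.isdigit():
--             has_digit = True
--         if c in "!@#$%^&*()_+-=[]{}|;:,.<>?":
--             has_special = True
--     issues = []
--     if len(password) < 8: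
--         issues.append("Too short (less than 8 characters)")
--     if not has_lower:
--         issues.append("No lowercase letters")
--     if not has_upper:
--         issues.append("No uppercase letters")
--     if not has_digit:
--         issues.append("No numbers")
--     if not has_special:
--         issues.append("No special characters")
--     if password.lower() in ["password", "123456", "qwerty", "abc123", "letmein"]:
--         issues.append("Common/dictionary password")
--     return issues
-- ===== Notes on version B (the rewrite author's own statement) =====
-- stated objective: simpler
-- what changed: Replaces A's four separate any() scans over the password by one single pass that accumulates has_lower/has_upper/has_digit/has_special flags, then builds the same issue list.
import Mathlib
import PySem

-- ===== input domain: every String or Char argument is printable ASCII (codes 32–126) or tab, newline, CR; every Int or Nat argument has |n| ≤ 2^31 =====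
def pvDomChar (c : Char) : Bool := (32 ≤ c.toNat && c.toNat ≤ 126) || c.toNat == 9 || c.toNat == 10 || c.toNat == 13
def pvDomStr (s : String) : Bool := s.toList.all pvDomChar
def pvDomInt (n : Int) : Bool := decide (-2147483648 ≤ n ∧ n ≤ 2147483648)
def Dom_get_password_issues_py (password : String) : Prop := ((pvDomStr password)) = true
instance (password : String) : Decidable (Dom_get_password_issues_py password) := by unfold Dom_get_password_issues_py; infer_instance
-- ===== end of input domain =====

-- B replaces A's four separate any() scans of the password by a single pass that
-- accumulates four booleans (simpler: one traversal instead of four).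

-- shared literal constants (the special-character set and the common-password list)
def pvSpecials : List Char := "!@#$%^&*()_+-=[]{}|;:,.<>?".toList
def pvCommon : List String := ["password", "123456", "qwerty", "abc123", "letmein"]

-- ===== PORT A =====
def get_password_issues_py (password : String) : List String :=
  let issues : List String := []
  let issues := if password.toList.length < 8 then issues ++ ["Too short (less than 8 characters)"] else issues
  let issues := if !(password.toList.any (fun c => PySem.Chars.islower c)) then issues ++ ["No lowercase letters"] else issues
  let issues := if !(password.toList.any (fun c => PySem.Chars.isupper c)) then issues ++ ["No uppercase letters"] else issues
  let issues := if !(password.toList.any (fun c => PySem.Chars.isdigit c)) then issues ++ ["No numbers"] else issues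
  -- 'c in "!@#…"' with c a single character is membership in the character set
  let issues := if !(password.toList.any (fun c => pvSpecials.contains c)) then issues ++ ["No special characters"] else issues
  let issues := if PySem.Str.lower password ∈ pvCommon then issues ++ ["Common/dictionary password"] else issues
  issues

-- ===== PORT B =====
-- one step of B's single pass: update (has_lower, has_upper, has_digit, has_special)
def pvStep (f : Bool × Bool × Bool × Bool) (c : Char) : Bool × Bool × Bool × Bool :=
  let g := if PySem.Chars.islower c then (true, f.2.1, f.2.2.1, f.2.2.2)
    else if PySem.Chars.isupper c then (f.1, true, f.2.2.1, f.2.2.2)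
    else if PySem.Chars.isdigit c then (f.1, f.2.1, true, f.2.2.2)
    else f
  if pvSpecials.contains c then (g.1, g.2.1, g.2.2.1, true) else g

def get_password_issues_py_alt (password : String) : List String :=
  let f := password.toList.foldl pvStep (false, false, false, false)
  let issues : List String := []
  let issues := if password.toList.length < 8 then issues ++ ["Too short (less than 8 characters)"] else issues
  let issues := if !f.1 then issues ++ ["No lowercase letters"] else issues
  let issues := if !f.2.1 then issues ++ ["No uppercase letters"] else issues
  let issues := if !f.2.2.1 then issues ++ ["No numbers"] else issues
  let issues := if !f.2.2.2 then issues ++ ["No special characters"] else issues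
  let issues := if PySem.Str.lower password ∈ pvCommon then issues ++ ["Common/dictionary password"] else issues
  issues

-- ===== PRECONDITION & SPEC =====
def Spec_get_password_issues_py (password : String) (out : List String) : Prop := out = get_password_issues_py_alt password
instance (password : String) (out : List String) : Decidable (Spec_get_password_issues_py password out) := by unfold Spec_get_password_issues_py; infer_instance

-- ===== CLAIM (what is proved, stated in full; the proofs are below) =====
def Claim_equal_get_password_issues_py : Prop := ∀ (password : String), Dom_get_password_issues_py password → Spec_get_password_issues_py password (get_password_issues_py password)

-- ===== LEMMAS AND PROOFS =====

-- the three letter/digit classes are pairwise disjoint (they are disjoint code-point ranges)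
theorem pv_lower_not_upper (c : Char) (h : PySem.Chars.islower c = true) : PySem.Chars.isupper c = false := by
  revert h
  simp only [PySem.Chars.islower, PySem.Chars.isupper, Char.le_def, Bool.and_eq_true,
    decide_eq_true_eq, Bool.and_eq_false_iff, decide_eq_false_iff_not, not_le,
    UInt32.le_iff_toNat_le,
    show ('a').val.toNat = 97 from rfl, show ('z').val.toNat = 122 from rfl,
    show ('A').val.toNat = 65 from rfl, show ('Z').val.toNat = 90 from rfl]
  intro h1
  omega

theorem pv_lower_not_digit (c : Char) (h : PySem.Chars.islower c = true) : PySem.Chars.isdigit c = false := by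
  revert h
  simp only [PySem.Chars.islower, PySem.Chars.isdigit, Char.le_def, Bool.and_eq_true,
    decide_eq_true_eq, Bool.and_eq_false_iff, decide_eq_false_iff_not, not_le,
    UInt32.le_iff_toNat_le,
    show ('a').val.toNat = 97 from rfl, show ('z').val.toNat = 122 from rfl,
    show ('0').val.toNat = 48 from rfl, show ('9').val.toNat = 57 from rfl]
  intro h1
  omega

theorem pv_upper_not_digit (c : Char) (h : PySem.Chars.isupper c = true) : PySem.Chars.isdigit c = false := by
  revert h
  simp only [PySem.Chars.isupper, PySem.Chars.isdigit, Char.le_def, Bool.and_eq_true,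
    decide_eq_true_eq, Bool.and_eq_false_iff, decide_eq_false_iff_not, not_le,
    UInt32.le_iff_toNat_le,
    show ('A').val.toNat = 65 from rfl, show ('Z').val.toNat = 90 from rfl,
    show ('0').val.toNat = 48 from rfl, show ('9').val.toNat = 57 from rfl]
  intro h1
  omega

-- B's single pass computes exactly the four any() scans of A
theorem pv_foldl_step (l : List Char) (a b d s : Bool) :
    l.foldl pvStep (a, b, d, s) =
      (a || l.any (fun c => PySem.Chars.islower c),
       b || l.any (fun c => PySem.Chars.isupper c),
       d || l.any (fun c => PySem.Chars.isdigit c),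
       s || l.any (fun c => pvSpecials.contains c)) := by
  induction l generalizing a b d s with
  | nil => simp
  | cons c l ih =>
    simp only [List.foldl_cons, List.any_cons]
    by_cases hl : PySem.Chars.islower c = true
    · by_cases hs : c ∈ pvSpecials
      · simp [pvStep, hl, hs, ih, pv_lower_not_upper c hl, pv_lower_not_digit c hl, Bool.or_assoc]
      · simp [pvStep, hl, hs, ih, pv_lower_not_upper c hl,
          pv_lower_not_digit c hl, Bool.or_assoc]
    · by_cases hu : PySem.Chars.isupper c = true
      · by_cases hs : c ∈ pvSpecials
        · simp [pvStep, hl, hu, hs, ih, pv_upper_not_digit c hu, Bool.or_assoc]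
        · simp [pvStep, hl, hu, hs, ih, pv_upper_not_digit c hu, Bool.or_assoc]
      · by_cases hd : PySem.Chars.isdigit c = true
        · by_cases hs : c ∈ pvSpecials
          · simp [pvStep, hl, hu, hd, hs, ih, Bool.or_assoc]
          · simp [pvStep, hl, hu, hd, hs, ih, Bool.or_assoc]
        · by_cases hs : c ∈ pvSpecials
          · simp [pvStep, hl, hu, hd, hs, ih, Bool.or_assoc]
          · simp [pvStep, hl, hu, hd, hs, ih, Bool.or_assoc]

-- ===== VERDICT (by name: the statement is the Claim_ definition above) =====
theorem get_password_issues_py_spec : Claim_equal_get_password_issues_py := by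
  intro password _
  unfold Spec_get_password_issues_py get_password_issues_py get_password_issues_py_alt
  rw [pv_foldl_step]
  simp only [Bool.false_or]
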